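-- pv_equiv track=rewrite | github.com/MinhBao19/Hooman-Learning | lib/scraper_woolworths.py | _detect_column_order_from_headers
-- ===== SOURCE A (Python) =====
-- def _detect_column_order_from_headers(headers):
--     hdrs = [h.lower() for h in headers]
--     idx_nutr = 0
--     if any('nutrient' in h or 'average quantity' in h or 'avg qty' in h for h in hdrs):
--         idx_nutr = min(range(len(hdrs)), key=lambda i: (0 if 'nutrient' in hdrs[i] else 1))
--     idx_serv = next((i for i,h in enumerate(hdrs) if 'per serving' in h or 'serving' in h), -1)
--     idx_100 = next((i for i,h in enumerate(hdrs) if 'per 100' in h or '100g' in h or '100 ml' in h), -1)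
--     if idx_serv == -1 or idx_100 == -1:
--         numericish = [i for i,h in enumerate(hdrs) if any(k in h for k in ['per 100','100','serv'])]
--         if len(numericish) >= 2:
--             idx_serv, idx_100 = numericish[0], numericish[1]
--     return idx_nutr, idx_serv, idx_100
-- ===== SOURCE B (Python) =====
-- def _detect_column_order_from_headers(headers):
--     idx_nutr, idx_serv, idx_100 = 0, -1, -1
--     nutr_found = False
--     numericish = []
--     for i, h in enumerate(headers):
--         h = h.lower()
--         if not nutr_found and 'nutrient' in h:
--             idx_nutr, nutr_found = i, True
--         if idx_serv == -1 and 'serving' in h: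
--             idx_serv = i
--         if idx_100 == -1 and ('per 100' in h or '100g' in h or '100 ml' in h):
--             idx_100 = i
--         if '100' in h or 'serv' in h:
--             numericish.append(i)
--     if (idx_serv == -1 or idx_100 == -1) and len(numericish) >= 2:
--         idx_serv, idx_100 = numericish[0], numericish[1]
--     return idx_nutr, idx_serv, idx_100
-- ===== Notes on version B (the rewrite author's own statement) =====
-- stated objective: simpler
-- what changed: A's four separate scans over the headers (an any-guard plus a min-by-key over range(len) for the nutrient index, two next-generator scans for the serving/100g indices, and a filter pass for numericish) are fused into one single pass that records the first match of each simplified condition ('per serving' collapses into 'serving', the guarded min-by-key collapses into first-'nutrient'-else-0) and builds the numericish list on the fly.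
import Mathlib
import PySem

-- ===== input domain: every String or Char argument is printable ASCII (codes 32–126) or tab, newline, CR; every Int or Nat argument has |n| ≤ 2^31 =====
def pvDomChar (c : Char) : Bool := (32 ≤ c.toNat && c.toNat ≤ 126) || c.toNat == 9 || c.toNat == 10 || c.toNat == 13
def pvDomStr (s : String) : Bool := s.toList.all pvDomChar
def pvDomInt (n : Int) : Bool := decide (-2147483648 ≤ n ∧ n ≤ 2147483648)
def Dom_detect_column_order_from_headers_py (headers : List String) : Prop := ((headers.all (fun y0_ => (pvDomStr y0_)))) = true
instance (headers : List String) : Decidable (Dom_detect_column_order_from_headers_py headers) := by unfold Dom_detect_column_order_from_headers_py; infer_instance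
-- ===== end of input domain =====

-- B replaces A's four separate scans (any + min-by-key + two next generators + a filter) by one
-- single pass that records the first match of each simplified condition; objective: simpler (one pass;
-- a timing run measured it faster by a constant factor).

-- ===== PORT A =====
-- next((i for i,h in enumerate(hdrs) if p h), -1)
def pvNextA (l : List (Int × String)) (p : String → Bool) : Int :=
  match l with
  | [] => -1
  | (i, h) :: t => if p h then i else pvNextA t p

def detect_column_order_from_headers_py (headers : List String) : Int × Int × Int :=
  let hdrs := headers.map PySem.Str.lower
  let idx_nutr : Int :=
    if hdrs.any (fun h => PySem.Str.isIn "nutrient" h || PySem.Str.isIn "average quantity" h || PySem.Str.isIn "avg qty" h) then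
      -- min(range(len(hdrs)), key=…): the any-guard makes the range nonempty, so .getD 0 never supplies the ValueError default
      (PySem.List.min? (PySem.List.pyRange 0 (PySem.List.len hdrs))
        (fun i => if PySem.Str.isIn "nutrient" (PySem.List.pyGetD hdrs i "") then (0:Int) else 1)).getD 0
    else 0
  let idx_serv := pvNextA (PySem.List.enumerate hdrs)
      (fun h => PySem.Str.isIn "per serving" h || PySem.Str.isIn "serving" h)
  let idx_100 := pvNextA (PySem.List.enumerate hdrs)
      (fun h => PySem.Str.isIn "per 100" h || PySem.Str.isIn "100g" h || PySem.Str.isIn "100 ml" h)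
  if idx_serv = -1 ∨ idx_100 = -1 then
    let numericish := ((PySem.List.enumerate hdrs).filter
        (fun q => ["per 100", "100", "serv"].any (fun k => PySem.Str.isIn k q.2))).map (·.1)
    if 2 ≤ numericish.length then
      -- numericish[0] / numericish[1]: in range because length ≥ 2, so pyGetD's default is never used
      (idx_nutr, PySem.List.pyGetD numericish 0 0, PySem.List.pyGetD numericish 1 0)
    else (idx_nutr, idx_serv, idx_100)
  else (idx_nutr, idx_serv, idx_100)

-- ===== PORT B =====
-- one loop body: (nutr_found, idx_nutr, idx_serv, idx_100, numericish)
def pvAltStep (st : Bool × Int × Int × Int × List Int) (q : Int × String) : Bool × Int × Int × Int × List Int :=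
  match st, q with
  | (found, iN, iS, i1, num), (i, h0) =>
    let h := PySem.Str.lower h0
    ((found || PySem.Str.isIn "nutrient" h),
     (if !found && PySem.Str.isIn "nutrient" h then i else iN),
     (if iS == -1 && PySem.Str.isIn "serving" h then i else iS),
     (if i1 == -1 && (PySem.Str.isIn "per 100" h || PySem.Str.isIn "100g" h || PySem.Str.isIn "100 ml" h) then i else i1),
     (if PySem.Str.isIn "100" h || PySem.Str.isIn "serv" h then num ++ [i] else num))

def detect_column_order_from_headers_py_alt (headers : List String) : Int × Int × Int :=
  match (PySem.List.enumerate headers).foldl pvAltStep (false, 0, -1, -1, []) with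
  | (_, iN, iS, i1, num) =>
    if (iS == -1 || i1 == -1) && decide (2 ≤ num.length) then
      (iN, PySem.List.pyGetD num 0 0, PySem.List.pyGetD num 1 0)
    else (iN, iS, i1)

-- ===== PRECONDITION & SPEC =====
def Spec_detect_column_order_from_headers_py (headers : List String) (out : Int × Int × Int) : Prop := out = detect_column_order_from_headers_py_alt headers
instance (headers : List String) (out : Int × Int × Int) : Decidable (Spec_detect_column_order_from_headers_py headers out) := by unfold Spec_detect_column_order_from_headers_py; infer_instance

-- ===== CLAIM (what is proved, stated in full; the proofs are below) =====
def Claim_equal_detect_column_order_from_headers_py : Prop := ∀ (headers : List String), Dom_detect_column_order_from_headers_py headers → Spec_detect_column_order_from_headers_py headers (detect_column_order_from_headers_py headers)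

-- ===== LEMMAS AND PROOFS =====

-- a supersequence's containment implies the subword's containment
lemma pv_isIn_mono {sub1 sub2 : String} (hs : sub1.toList <:+: sub2.toList) (h : String) :
    PySem.Str.isIn sub2 h = true → PySem.Str.isIn sub1 h = true := by
  simp only [PySem.Str.isIn_iff_infix]
  exact fun h2 => hs.trans h2

lemma pv_serv_pred (h : String) :
    (PySem.Str.isIn "per serving" h || PySem.Str.isIn "serving" h) = PySem.Str.isIn "serving" h := by
  cases hv : PySem.Str.isIn "serving" h with
  | true => simp
  | false =>
    cases hp : PySem.Str.isIn "per serving" h with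
    | false => simp
    | true => exact absurd (pv_isIn_mono (sub1 := "serving") (sub2 := "per serving") (by decide) h hp) (by simpa using hv)

lemma pv_num_pred (h : String) :
    (PySem.Str.isIn "per 100" h || (PySem.Str.isIn "100" h || PySem.Str.isIn "serv" h))
      = (PySem.Str.isIn "100" h || PySem.Str.isIn "serv" h) := by
  cases hv : PySem.Str.isIn "100" h with
  | true => simp
  | false =>
    cases hp : PySem.Str.isIn "per 100" h with
    | false => simp
    | true => exact absurd (pv_isIn_mono (sub1 := "100") (sub2 := "per 100") (by decide) h hp) (by simpa using hv)

lemma pv_enumerate_map {α β : Type} (f : α → β) (xs : List α) (s : Int) :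
    PySem.List.enumerate (xs.map f) s = (PySem.List.enumerate xs s).map (fun q => (q.1, f q.2)) := by
  induction xs generalizing s with
  | nil => simp [PySem.List.enumerate_nil]
  | cons x t ih => simp [PySem.List.enumerate_cons, ih]

lemma pvNextA_eq (l : List (Int × String)) (p : String → Bool) :
    pvNextA l p = (((l.find? (fun q => p q.2)).map (·.1)).getD (-1)) := by
  induction l with
  | nil => simp [pvNextA]
  | cons q t ih =>
    obtain ⟨i, h⟩ := q
    by_cases hp : p h
    · simp [pvNextA, hp, List.find?]
    · simp [pvNextA, hp, List.find?, ih]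

-- Python's min over a nonempty cons with a {0,1}-valued key returns the first key-0 element, else the head
lemma pv_min?_step (key : Int → Int) (x y : Int) (t : List Int) :
    PySem.List.min? (x :: y :: t) key
      = PySem.List.min? ((if key y < key x then y else x) :: t) key := by
  simp only [PySem.List.min?, List.foldl_cons]
  split <;> rfl

lemma pv_min?_cons (p : Int → Bool) (x : Int) (xs : List Int) :
    PySem.List.min? (x :: xs) (fun i => if p i then (0:Int) else 1)
      = some (if p x then x else ((xs.find? p).getD x)) := by
  induction xs generalizing x with
  | nil => simp [PySem.List.min?]
  | cons y t ih =>
    rw [pv_min?_step]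
    by_cases hx : p x
    · by_cases hy : p y <;> simp [hx, hy, ih]
    · by_cases hy : p y <;> simp [hx, hy, ih]

-- A's min(range(len(hdrs)), key=…) picks the first 'nutrient' index, else 0
lemma pv_min_eq (hdrs : List String) (hne : hdrs ≠ []) :
    (PySem.List.min? (PySem.List.pyRange 0 (PySem.List.len hdrs))
        (fun i => if PySem.Str.isIn "nutrient" (PySem.List.pyGetD hdrs i "") then (0:Int) else 1)).getD 0
      = ((((PySem.List.enumerate hdrs).find? (fun q => PySem.Str.isIn "nutrient" q.2)).map (·.1)).getD 0) := by
  have h0lt : (0 : Int) < PySem.List.len hdrs := by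
    have : 0 < hdrs.length := List.length_pos_iff.mpr hne
    simp [PySem.List.len]; omega
  rw [PySem.List.enumerate_eq_map_pyRange hdrs "", List.find?_map]
  rw [PySem.List.pyRange_one_cons h0lt]
  rw [pv_min?_cons (fun i => PySem.Str.isIn "nutrient" (PySem.List.pyGetD hdrs i ""))]
  by_cases hp : PySem.Str.isIn "nutrient" (PySem.List.pyGetD hdrs 0 "") = true <;>
    simp_all [Function.comp_def]

-- the closed form of B's loop
lemma pv_fold_inv (l : List (Int × String)) (hpos : ∀ q ∈ l, 0 ≤ q.1)
    (found : Bool) (iN iS i1 : Int) (num : List Int) :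
    l.foldl pvAltStep (found, iN, iS, i1, num) =
      ((found || l.any (fun q => PySem.Str.isIn "nutrient" (PySem.Str.lower q.2))),
       (if found then iN else (((l.find? (fun q => PySem.Str.isIn "nutrient" (PySem.Str.lower q.2))).map (·.1)).getD iN)),
       (if iS = -1 then (((l.find? (fun q => PySem.Str.isIn "serving" (PySem.Str.lower q.2))).map (·.1)).getD (-1)) else iS),
       (if i1 = -1 then (((l.find? (fun q => PySem.Str.isIn "per 100" (PySem.Str.lower q.2) || PySem.Str.isIn "100g" (PySem.Str.lower q.2) || PySem.Str.isIn "100 ml" (PySem.Str.lower q.2))).map (·.1)).getD (-1)) else i1),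
       (num ++ (l.filter (fun q => PySem.Str.isIn "100" (PySem.Str.lower q.2) || PySem.Str.isIn "serv" (PySem.Str.lower q.2))).map (·.1))) := by
  induction l generalizing found iN iS i1 num with
  | nil => simp
  | cons q t ih =>
    obtain ⟨i, h0⟩ := q
    have hi : 0 ≤ i := hpos (i, h0) (by simp)
    have hine : ¬ (i = -1) := by omega
    have ht : ∀ q ∈ t, 0 ≤ q.1 := fun q hq => hpos q (by simp [hq])
    rw [List.foldl_cons, pvAltStep, ih ht]
    clear ih ht hpos hi
    simp only [Prod.mk.injEq]
    refine ⟨?_, ?_, ?_, ?_, ?_⟩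
    · cases found <;>
        by_cases hN : PySem.Str.isIn "nutrient" (PySem.Str.lower h0) = true <;>
        simp_all [List.any_cons]
    · cases found <;>
        by_cases hN : PySem.Str.isIn "nutrient" (PySem.Str.lower h0) = true <;>
        simp_all [List.find?]
    · by_cases hiS : iS = -1 <;>
        by_cases hS : PySem.Str.isIn "serving" (PySem.Str.lower h0) = true <;>
        simp_all [List.find?]
    · by_cases hi1 : i1 = -1 <;>
        by_cases h1 : (PySem.Str.isIn "per 100" (PySem.Str.lower h0) || PySem.Str.isIn "100g" (PySem.Str.lower h0) || PySem.Str.isIn "100 ml" (PySem.Str.lower h0)) = true <;>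
        simp_all [List.find?] <;>
        (try (rcases h1 with (h | h) | h <;> simp [h]))
    · by_cases hF : (PySem.Str.isIn "100" (PySem.Str.lower h0) || PySem.Str.isIn "serv" (PySem.Str.lower h0)) = true
      all_goals simp_all

-- the common shape both programs reduce to
def pvFinal (iN iS i1 : Int) (num : List Int) : Int × Int × Int :=
  if iS = -1 ∨ i1 = -1 then
    if 2 ≤ num.length then (iN, PySem.List.pyGetD num 0 0, PySem.List.pyGetD num 1 0)
    else (iN, iS, i1)
  else (iN, iS, i1)

def pvNutrP (q : Int × String) : Bool := PySem.Str.isIn "nutrient" (PySem.Str.lower q.2)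
def pvServP (q : Int × String) : Bool := PySem.Str.isIn "serving" (PySem.Str.lower q.2)
def pv100P (q : Int × String) : Bool :=
  PySem.Str.isIn "per 100" (PySem.Str.lower q.2) || PySem.Str.isIn "100g" (PySem.Str.lower q.2) || PySem.Str.isIn "100 ml" (PySem.Str.lower q.2)
def pvNumP (q : Int × String) : Bool := PySem.Str.isIn "100" (PySem.Str.lower q.2) || PySem.Str.isIn "serv" (PySem.Str.lower q.2)

-- B's boolean final branch is the Prop-if shape pvFinal
lemma pv_match_final (iN iS i1 : Int) (num : List Int) :
    (if (iS == -1 || i1 == -1) && decide (2 ≤ num.length) then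
        (iN, PySem.List.pyGetD num 0 0, PySem.List.pyGetD num 1 0)
      else (iN, iS, i1)) = pvFinal iN iS i1 num := by
  unfold pvFinal
  by_cases hS : iS = -1 <;> by_cases h1 : i1 = -1 <;> by_cases hn : 2 ≤ num.length <;>
    simp [hS, h1, hn]

lemma pv_B_eq (headers : List String) :
    detect_column_order_from_headers_py_alt headers =
      pvFinal (((((PySem.List.enumerate headers).find? pvNutrP).map (·.1)).getD 0))
        (((((PySem.List.enumerate headers).find? pvServP).map (·.1)).getD (-1)))
        (((((PySem.List.enumerate headers).find? pv100P).map (·.1)).getD (-1)))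
        (((PySem.List.enumerate headers).filter pvNumP).map (·.1)) := by
  have hpos : ∀ q ∈ PySem.List.enumerate headers, 0 ≤ q.1 := by
    intro q hq
    rw [PySem.List.mem_enumerate_iff] at hq
    obtain ⟨k, hk, rfl⟩ := hq
    simp
  simp only [detect_column_order_from_headers_py_alt]
  rw [pv_fold_inv _ hpos, ← pv_match_final]
  unfold pvNutrP pvServP pv100P pvNumP
  simp

lemma pv_A_eq (headers : List String) :
    detect_column_order_from_headers_py headers =
      pvFinal (((((PySem.List.enumerate headers).find? pvNutrP).map (·.1)).getD 0))
        (((((PySem.List.enumerate headers).find? pvServP).map (·.1)).getD (-1)))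
        (((((PySem.List.enumerate headers).find? pv100P).map (·.1)).getD (-1)))
        (((PySem.List.enumerate headers).filter pvNumP).map (·.1)) := by
  -- move the scans from 'enumerate (map lower headers)' to 'enumerate headers'
  have hmap := pv_enumerate_map PySem.Str.lower headers 0
  -- nutrient: the guarded min equals the first-'nutrient' scan
  have hnutr :
      (if (headers.map PySem.Str.lower).any (fun h => PySem.Str.isIn "nutrient" h || PySem.Str.isIn "average quantity" h || PySem.Str.isIn "avg qty" h) then
        (PySem.List.min? (PySem.List.pyRange 0 (PySem.List.len (headers.map PySem.Str.lower)))
          (fun i => if PySem.Str.isIn "nutrient" (PySem.List.pyGetD (headers.map PySem.Str.lower) i "") then (0:Int) else 1)).getD 0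
      else 0)
        = ((((PySem.List.enumerate headers).find? pvNutrP).map (·.1)).getD 0) := by
    by_cases hany : (headers.map PySem.Str.lower).any
        (fun h => PySem.Str.isIn "nutrient" h || PySem.Str.isIn "average quantity" h || PySem.Str.isIn "avg qty" h) = true
    · have hne : headers.map PySem.Str.lower ≠ [] := by
        intro h0
        rw [h0] at hany
        simp at hany
      rw [if_pos hany, pv_min_eq _ hne, hmap, List.find?_map]
      unfold pvNutrP
      simp [Option.map_map, Function.comp_def]
    · rw [if_neg hany]
      have hnone : (PySem.List.enumerate headers).find? pvNutrP = none := by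
        rw [List.find?_eq_none]
        intro q hq
        rw [PySem.List.mem_enumerate_iff] at hq
        obtain ⟨k, hk, rfl⟩ := hq
        intro hcon
        apply hany
        rw [List.any_eq_true]
        refine ⟨PySem.Str.lower headers[k], List.mem_map_of_mem (by simp), ?_⟩
        simp only [pvNutrP] at hcon
        simp only [Bool.or_eq_true]
        exact Or.inl (Or.inl (by simpa using hcon))
      rw [hnone]
      rfl
  simp only [detect_column_order_from_headers_py]
  rw [hnutr, hmap]
  rw [pvNextA_eq, pvNextA_eq, List.find?_map, List.find?_map, List.filter_map, List.map_map]
  simp only [Function.comp_def, List.any_cons, List.any_nil, Bool.or_false]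
  simp only [pv_serv_pred, pv_num_pred]
  unfold pvFinal pvNutrP pvServP pv100P pvNumP
  simp [Function.comp_def]

-- ===== VERDICT (by name: the statement is the Claim_ definition above) =====
theorem detect_column_order_from_headers_py_spec : Claim_equal_detect_column_order_from_headers_py := by
  intro headers _hd
  unfold Spec_detect_column_order_from_headers_py
  rw [pv_A_eq, pv_B_eq]
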